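-- pv_equiv track=rewrite | github.com/IgorMitrofanov/365_leet_code | python/840_Magic_Squares_In_Grid.py | numMagicSquaresInside
-- ===== SOURCE A (Python) =====
-- from typing import List
--
-- def numMagicSquaresInside(grid: List[List[int]]) -> int:
--     def is_magic(i, j):
--         s = set()
--         for x in range(3):
--             for y in range(3):
--                 s.add(grid[i + x][j + y])
--         if s != set(range(1, 10)):
--             return False
--         if grid[i][j] + grid[i][j + 1] + grid[i][j + 2] != 15:
--             return False
--         if grid[i + 1][j] + grid[i + 1][j + 1] + grid[i + 1][j + 2] != 15:
--             return False
--         if grid[i + 2][j] + grid[i + 2][j + 1] + grid[i + 2][j + 2] != 15: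
--             return False
--         if grid[i][j] + grid[i + 1][j] + grid[i + 2][j] != 15:
--             return False
--         if grid[i][j + 1] + grid[i + 1][j + 1] + grid[i + 2][j + 1] != 15:
--             return False
--         if grid[i][j + 2] + grid[i + 1][j + 2] + grid[i + 2][j + 2] != 15:
--             return False
--         if grid[i][j] + grid[i + 1][j + 1] + grid[i + 2][j + 2] != 15:
--             return False
--         if grid[i][j + 2] + grid[i + 1][j + 1] + grid[i + 2][j] != 15:
--             return False
--         return True
--
--     count = 0
--     rows, cols = len(grid), len(grid[0])
--     for i in range(rows - 2):
--         for j in range(cols - 2):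
--             if is_magic(i, j):
--                 count += 1
--     return count
-- ===== SOURCE B (Python) =====
-- def numMagicSquaresInside(grid):
--     # The unique 1-9 magic square has center 5; its border read clockwise from
--     # the top-left corner is one of these 8 tuples (rotations/reflections).
--     valid = {
--         (2, 7, 6, 1, 8, 3, 4, 9),
--         (4, 9, 2, 7, 6, 1, 8, 3),
--         (8, 3, 4, 9, 2, 7, 6, 1),
--         (6, 1, 8, 3, 4, 9, 2, 7),
--         (2, 9, 4, 3, 8, 1, 6, 7),
--         (4, 3, 8, 1, 6, 7, 2, 9),
--         (8, 1, 6, 7, 2, 9, 4, 3),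
--         (6, 7, 2, 9, 4, 3, 8, 1),
--     }
--     rows, cols = len(grid), len(grid[0])
--     count = 0
--     for i in range(rows - 2):
--         for j in range(cols - 2):
--             if grid[i + 1][j + 1] != 5:
--                 continue
--             border = (grid[i][j], grid[i][j + 1], grid[i][j + 2],
--                       grid[i + 1][j + 2], grid[i + 2][j + 2],
--                       grid[i + 2][j + 1], grid[i + 2][j], grid[i + 1][j])
--             if border in valid:
--                 count += 1
--     return count
-- ===== Notes on version B (the rewrite author's own statement) =====
-- stated objective: faster
-- what changed: Per 3x3 window, A builds a set of the nine cells, compares it to set(range(1,10)) and checks eight row/column/diagonal sums; B instead requires the center to be 5 and tests the eight perimeter cells, read clockwise, against a precomputed set of the 8 rotated/reflected borders of the unique 1-9 magic square.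
import Mathlib
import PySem

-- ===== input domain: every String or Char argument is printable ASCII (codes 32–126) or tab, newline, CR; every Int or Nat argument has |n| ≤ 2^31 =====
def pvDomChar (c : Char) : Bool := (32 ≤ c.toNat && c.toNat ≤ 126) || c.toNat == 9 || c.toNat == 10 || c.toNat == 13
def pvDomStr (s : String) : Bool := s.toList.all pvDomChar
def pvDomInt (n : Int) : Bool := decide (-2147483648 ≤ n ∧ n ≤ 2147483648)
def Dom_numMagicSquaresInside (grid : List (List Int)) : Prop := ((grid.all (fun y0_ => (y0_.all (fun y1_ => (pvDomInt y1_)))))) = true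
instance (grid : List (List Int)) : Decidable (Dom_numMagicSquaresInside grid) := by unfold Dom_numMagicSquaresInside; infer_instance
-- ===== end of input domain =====

-- B replaces A's per-window set construction and eight sum checks by a cheaper pattern test:
-- center = 5, then the 8 perimeter cells (read clockwise) against the 8 precomputed magic borders.

-- grid[i][j] with both indices known in range (Pre_ guarantees it where it is reached)
def pvCell (grid : List (List Int)) (i j : Int) : Int :=
  PySem.List.pyGetD (PySem.List.pyGetD grid i []) j 0

-- ===== PORT A =====
def pvIsMagic (grid : List (List Int)) (i j : Int) : Bool :=
  let s : PySem.Set Int :=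
    (PySem.List.pyRange 0 3 1).foldl (fun s x =>
      (PySem.List.pyRange 0 3 1).foldl (fun s y =>
        PySem.Set.add s (pvCell grid (i + x) (j + y))) s) PySem.Set.empty
  if ¬ (PySem.Set.equal s (PySem.Set.ofList (PySem.List.pyRange 1 10 1)) = true) then false
  else if pvCell grid i j + pvCell grid i (j + 1) + pvCell grid i (j + 2) ≠ 15 then false
  else if pvCell grid (i + 1) j + pvCell grid (i + 1) (j + 1) + pvCell grid (i + 1) (j + 2) ≠ 15 then false
  else if pvCell grid (i + 2) j + pvCell grid (i + 2) (j + 1) + pvCell grid (i + 2) (j + 2) ≠ 15 then false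
  else if pvCell grid i j + pvCell grid (i + 1) j + pvCell grid (i + 2) j ≠ 15 then false
  else if pvCell grid i (j + 1) + pvCell grid (i + 1) (j + 1) + pvCell grid (i + 2) (j + 1) ≠ 15 then false
  else if pvCell grid i (j + 2) + pvCell grid (i + 1) (j + 2) + pvCell grid (i + 2) (j + 2) ≠ 15 then false
  else if pvCell grid i j + pvCell grid (i + 1) (j + 1) + pvCell grid (i + 2) (j + 2) ≠ 15 then false
  else if pvCell grid i (j + 2) + pvCell grid (i + 1) (j + 1) + pvCell grid (i + 2) j ≠ 15 then false
  else true

def numMagicSquaresInside (grid : List (List Int)) : Int :=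
  let rows : Int := PySem.List.len grid
  let cols : Int := PySem.List.len (PySem.List.pyGetD grid 0 [])
  (PySem.List.pyRange 0 (rows - 2) 1).foldl (fun count i =>
    (PySem.List.pyRange 0 (cols - 2) 1).foldl (fun count j =>
      if pvIsMagic grid i j then count + 1 else count) count) 0

-- ===== PORT B =====
abbrev pvBorder8 := Int × Int × Int × Int × Int × Int × Int × Int

-- the 8 rotations/reflections of the unique magic border, clockwise from the top-left corner
def pvValid : PySem.Set pvBorder8 := PySem.Set.ofList
  [ (2, 7, 6, 1, 8, 3, 4, 9), (4, 9, 2, 7, 6, 1, 8, 3),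
    (8, 3, 4, 9, 2, 7, 6, 1), (6, 1, 8, 3, 4, 9, 2, 7),
    (2, 9, 4, 3, 8, 1, 6, 7), (4, 3, 8, 1, 6, 7, 2, 9),
    (8, 1, 6, 7, 2, 9, 4, 3), (6, 7, 2, 9, 4, 3, 8, 1) ]

def pvBorderOf (grid : List (List Int)) (i j : Int) : pvBorder8 :=
  (pvCell grid i j, pvCell grid i (j + 1), pvCell grid i (j + 2),
   pvCell grid (i + 1) (j + 2), pvCell grid (i + 2) (j + 2),
   pvCell grid (i + 2) (j + 1), pvCell grid (i + 2) j, pvCell grid (i + 1) j)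

def numMagicSquaresInside_alt (grid : List (List Int)) : Int :=
  let rows : Int := PySem.List.len grid
  let cols : Int := PySem.List.len (PySem.List.pyGetD grid 0 [])
  (PySem.List.pyRange 0 (rows - 2) 1).foldl (fun count i =>
    (PySem.List.pyRange 0 (cols - 2) 1).foldl (fun count j =>
      if pvCell grid (i + 1) (j + 1) ≠ 5 then count
      else if PySem.Set.contains pvValid (pvBorderOf grid i j) then count + 1
      else count) count) 0

-- ===== PRECONDITION & SPEC =====
-- Pre_ excludes exactly the inputs on which Python A raises: the empty grid (grid[0] is an
-- IndexError), and grids with ≥3 rows and first row of length ≥3 in which some row is shorter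
-- than the first (an out-of-range grid[i+x][j+y] is then reached).
def Pre_numMagicSquaresInside (grid : List (List Int)) : Prop :=
  grid ≠ [] ∧
    (grid.length < 3 ∨ (grid.headD []).length < 3 ∨
      ∀ row ∈ grid, (grid.headD []).length ≤ row.length)
instance (grid : List (List Int)) : Decidable (Pre_numMagicSquaresInside grid) := by
  unfold Pre_numMagicSquaresInside; infer_instance

def pvWitness_numMagicSquaresInside : List (List Int) := [[4, 9, 2], [3, 5, 7], [8, 1, 6]]

def Spec_numMagicSquaresInside (grid : List (List Int)) (out : Int) : Prop := out = numMagicSquaresInside_alt grid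
instance (grid : List (List Int)) (out : Int) : Decidable (Spec_numMagicSquaresInside grid out) := by unfold Spec_numMagicSquaresInside; infer_instance

-- ===== CLAIM (what is proved, stated in full; the proofs are below) =====
def Claim_equal_numMagicSquaresInside : Prop := ∀ (grid : List (List Int)), Dom_numMagicSquaresInside grid → Pre_numMagicSquaresInside grid → Spec_numMagicSquaresInside grid (numMagicSquaresInside grid)

-- ===== LEMMAS AND PROOFS =====

-- once the center is 5 and the linear relations hold, only eight (corner, edge) pairs survive
set_option maxHeartbeats 1000000 in
theorem pv_pin (a b : Int)
    (ra : 1 ≤ a ∧ a < 10) (rb : 1 ≤ b ∧ b < 10)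
    (rc : 1 ≤ 15 - a - b ∧ 15 - a - b < 10)
    (rd : 1 ≤ 20 - 2 * a - b ∧ 20 - 2 * a - b < 10)
    (m1 : 1 = a ∨ 1 = b ∨ 1 = 15 - a - b ∨ 1 = 20 - 2 * a - b ∨ (1 : Int) = 5
      ∨ 1 = 2 * a + b - 10 ∨ 1 = a + b - 5 ∨ 1 = 10 - b ∨ 1 = 10 - a)
    (m2 : 2 = a ∨ 2 = b ∨ 2 = 15 - a - b ∨ 2 = 20 - 2 * a - b ∨ (2 : Int) = 5
      ∨ 2 = 2 * a + b - 10 ∨ 2 = a + b - 5 ∨ 2 = 10 - b ∨ 2 = 10 - a) :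
    (a = 2 ∧ b = 7) ∨ (a = 4 ∧ b = 9) ∨ (a = 8 ∧ b = 3) ∨ (a = 6 ∧ b = 1) ∨
    (a = 2 ∧ b = 9) ∨ (a = 4 ∧ b = 3) ∨ (a = 8 ∧ b = 1) ∨ (a = 6 ∧ b = 7) := by
  rcases m1 with hx|hx|hx|hx|hx|hx|hx|hx|hx <;>
    rcases m2 with hy|hy|hy|hy|hy|hy|hy|hy|hy <;> omega

-- the pure heart of the equivalence, on the nine window values (row-major a..i)
set_option maxHeartbeats 1000000 in
theorem pv_magic_iff (a b c d e f g h i : Int) :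
    (PySem.Set.equal (PySem.Set.ofList [a, b, c, d, e, f, g, h, i])
        (PySem.Set.ofList (PySem.List.pyRange 1 10 1)) = true
      ∧ a + b + c = 15 ∧ d + e + f = 15 ∧ g + h + i = 15
      ∧ a + d + g = 15 ∧ b + e + h = 15 ∧ c + f + i = 15
      ∧ a + e + i = 15 ∧ c + e + g = 15)
    ↔ (e = 5 ∧ (a, b, c, f, i, h, g, d) ∈ pvValid) := by
  constructor
  · rintro ⟨hset, h1, h2, h3, h4, h5, h6, h7, h8⟩
    rw [PySem.Set.equal_iff] at hset
    simp only [PySem.Set.mem_ofList, PySem.List.mem_pyRange_one, List.mem_cons,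
      List.not_mem_nil, or_false] at hset
    have ra := (hset a).mp (.inl rfl)
    have rb := (hset b).mp (.inr (.inl rfl))
    have rc := (hset c).mp (.inr (.inr (.inl rfl)))
    have rd := (hset d).mp (.inr (.inr (.inr (.inl rfl))))
    have m1 := (hset 1).mpr (by omega)
    have m2 := (hset 2).mpr (by omega)
    clear hset
    have he : e = 5 := by omega
    subst he
    have hc : c = 15 - a - b := by omega
    subst hc
    have hi : i = 10 - a := by omega
    subst hi
    have hh : h = 10 - b := by omega
    subst hh
    have hg : g = a + b - 5 := by omega
    subst hg
    have hd : d = 20 - 2 * a - b := by omega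
    subst hd
    have hf : f = 2 * a + b - 10 := by omega
    subst hf
    refine ⟨rfl, ?_⟩
    rcases pv_pin a b ra rb rc rd m1 m2 with
      ⟨rfl,rfl⟩|⟨rfl,rfl⟩|⟨rfl,rfl⟩|⟨rfl,rfl⟩|⟨rfl,rfl⟩|⟨rfl,rfl⟩|⟨rfl,rfl⟩|⟨rfl,rfl⟩ <;> decide
  · rintro ⟨rfl, hmem⟩
    rw [pvValid, PySem.Set.mem_ofList] at hmem
    simp only [List.mem_cons, List.not_mem_nil, or_false, Prod.mk.injEq] at hmem
    rcases hmem with ⟨rfl,rfl,rfl,rfl,rfl,rfl,rfl,rfl⟩|⟨rfl,rfl,rfl,rfl,rfl,rfl,rfl,rfl⟩|⟨rfl,rfl,rfl,rfl,rfl,rfl,rfl,rfl⟩|⟨rfl,rfl,rfl,rfl,rfl,rfl,rfl,rfl⟩|⟨rfl,rfl,rfl,rfl,rfl,rfl,rfl,rfl⟩|⟨rfl,rfl,rfl,rfl,rfl,rfl,rfl,rfl⟩|⟨rfl,rfl,rfl,rfl,rfl,rfl,rfl,rfl⟩|⟨rfl,rfl,rfl,rfl,rfl,rfl,rfl,rfl⟩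 <;>
      exact ⟨by
        rw [PySem.Set.equal_iff]
        intro x
        simp only [PySem.Set.mem_ofList, PySem.List.mem_pyRange_one, List.mem_cons,
          List.not_mem_nil, or_false]
        omega, by norm_num⟩

-- the set A builds over the 3×3 window is the row-major list of its nine cells, as a Set
theorem pv_window_set (grid : List (List Int)) (i j : Int) :
    (PySem.List.pyRange 0 3 1).foldl (fun s x =>
      (PySem.List.pyRange 0 3 1).foldl (fun s y =>
        PySem.Set.add s (pvCell grid (i + x) (j + y))) s) PySem.Set.empty
    = PySem.Set.ofList
        [pvCell grid i j, pvCell grid i (j + 1), pvCell grid i (j + 2),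
         pvCell grid (i + 1) j, pvCell grid (i + 1) (j + 1), pvCell grid (i + 1) (j + 2),
         pvCell grid (i + 2) j, pvCell grid (i + 2) (j + 1), pvCell grid (i + 2) (j + 2)] := by
  rw [PySem.Set.ofList_eq_foldl]
  simp [show PySem.List.pyRange 0 3 1 = [0, 1, 2] from by decide, List.foldl,
    PySem.Set.empty]

-- A's window test ⇔ B's window test
theorem pv_isMagic_iff (grid : List (List Int)) (i j : Int) :
    pvIsMagic grid i j = true ↔
      (pvCell grid (i + 1) (j + 1) = 5 ∧ pvBorderOf grid i j ∈ pvValid) := by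
  unfold pvIsMagic
  rw [pv_window_set]
  rw [show (pvCell grid (i + 1) (j + 1) = 5 ∧ pvBorderOf grid i j ∈ pvValid) ↔ _ from
    (pv_magic_iff (pvCell grid i j) (pvCell grid i (j + 1)) (pvCell grid i (j + 2))
      (pvCell grid (i + 1) j) (pvCell grid (i + 1) (j + 1)) (pvCell grid (i + 1) (j + 2))
      (pvCell grid (i + 2) j) (pvCell grid (i + 2) (j + 1)) (pvCell grid (i + 2) (j + 2))).symm]
  split_ifs <;> simp_all

-- the two inner loop bodies agree
theorem pv_step_eq (grid : List (List Int)) (i j count : Int) :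
    (if pvIsMagic grid i j then count + 1 else count)
    = (if pvCell grid (i + 1) (j + 1) ≠ 5 then count
       else if PySem.Set.contains pvValid (pvBorderOf grid i j) then count + 1
       else count) := by
  by_cases hc : pvCell grid (i + 1) (j + 1) = 5
  · by_cases hm : pvBorderOf grid i j ∈ pvValid
    · rw [if_pos ((pv_isMagic_iff grid i j).mpr ⟨hc, hm⟩), if_neg (not_not_intro hc),
        if_pos ((PySem.Set.contains_iff _ _).mpr hm)]
    · rw [if_neg (fun hmag => hm ((pv_isMagic_iff grid i j).mp hmag).2),
        if_neg (not_not_intro hc),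
        if_neg (fun hcon => hm ((PySem.Set.contains_iff _ _).mp hcon))]
  · rw [if_neg (fun hmag => hc ((pv_isMagic_iff grid i j).mp hmag).1), if_pos hc]

theorem numMagicSquaresInside_spec : Claim_equal_numMagicSquaresInside := by
  intro grid _ _
  simp only [Spec_numMagicSquaresInside, numMagicSquaresInside, numMagicSquaresInside_alt]
  refine PySem.List.foldl_congr_mem _ _ _ _ (fun count i _ => ?_)
  exact PySem.List.foldl_congr_mem _ _ _ _ (fun count j _ => pv_step_eq grid i j count)
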